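-- pv_equiv track=rewrite | github.com/koii-network/prometheus-beta | src/validate_subsequences.py | can_divide_subsequences
-- ===== SOURCE A (Python) =====
-- def can_divide_subsequences(s):
--     """
--     Determine if a string of lowercase English letters can be divided into subsequences
--     of at least 2 letters where each subsequence consists of either all vowels or all consonants.
--
--     Args:
--         s (str): A string of lowercase English letters
--
--     Returns:
--         bool: True if the string can be divided into valid subsequences, False otherwise
--     """
--     # Check if string is empty or too short
--     if not s or len(s) < 2:
--         return False
--
--     # Define vowels and consonants
--     vowels = set('aeiou')
--
--     # Function to check if a sequence is valid (all vowels or all consonants)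
--     def is_valid_sequence(seq):
--         return len(seq) >= 2 and (all(c in vowels for c in seq) or all(c not in vowels for c in seq))
--
--     # Try all possible divisions
--     def can_divide(index):
--         # Base case: reached the end of the string
--         if index == len(s):
--             return True
--
--         # Try subsequences of at least 2 letters
--         for length in range(2, len(s) - index + 1):
--             subsequence = s[index:index+length]
--             if is_valid_sequence(subsequence):
--                 # Recursively check if the rest of the string can be divided
--                 if can_divide(index + length):
--                     return True
--
--         return False
--
--     return can_divide(0)
-- ===== SOURCE B (Python) =====
-- def can_divide_subsequences(s):
--     """Linear scan: the string splits into valid segments iff it has length >= 2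
--     and every maximal run of same-class (vowel/non-vowel) characters has length >= 2,
--     since a run of length L >= 2 splits into pieces of sizes 2 and 3 and a segment
--     can never cross a class boundary."""
--     vowels = set('aeiou')
--     if len(s) < 2:
--         return False
--     prev = s[0] in vowels
--     run = 1
--     for ch in s[1:]:
--         cur = ch in vowels
--         if cur == prev:
--             run += 1
--         else:
--             if run < 2:
--                 return False
--             prev, run = cur, 1
--     return run >= 2
-- ===== Notes on version B (the rewrite author's own statement) =====
-- stated objective: faster
-- what changed: A tries every split point with exponential backtracking recursion; B does one linear scan verifying that the string has length >= 2 and every maximal vowel/consonant run has length >= 2, which is equivalent because a run of length L >= 2 always splits into pieces of sizes 2 and 3 and a segment can never cross a class boundary.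
import Mathlib
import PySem

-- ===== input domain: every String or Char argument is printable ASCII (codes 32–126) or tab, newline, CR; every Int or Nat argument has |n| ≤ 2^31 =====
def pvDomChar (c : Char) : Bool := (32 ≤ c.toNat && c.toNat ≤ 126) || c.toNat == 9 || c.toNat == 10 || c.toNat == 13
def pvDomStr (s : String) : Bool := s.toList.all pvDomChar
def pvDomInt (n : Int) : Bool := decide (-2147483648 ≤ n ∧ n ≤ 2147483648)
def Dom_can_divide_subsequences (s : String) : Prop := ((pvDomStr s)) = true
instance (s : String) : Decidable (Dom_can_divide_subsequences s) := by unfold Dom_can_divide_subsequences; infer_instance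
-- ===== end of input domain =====

-- B replaces A's try-all-splits recursion by one linear scan checking that every maximal
-- vowel/consonant run has length ≥ 2 (and the string has length ≥ 2); same return value.

-- ===== PORT A =====
-- vowels = set('aeiou')
def pvVowelsA : PySem.Set Char := PySem.Set.ofList "aeiou".toList

-- is_valid_sequence(seq)
def pvIsValidSeq (seq : List Char) : Bool :=
  decide (2 ≤ seq.length) &&
    (seq.all (fun c => pvVowelsA.contains c) || seq.all (fun c => !pvVowelsA.contains c))

-- can_divide(index): try every length in range(2, len(s)-index+1); the early-return-True
-- for loop is `any` (attach carries the membership fact used only for termination)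
def pvCanDivideA (cs : List Char) (index : Nat) : Bool :=
  if index = cs.length then true
  else
    (List.range' 2 (cs.length - index - 1)).attach.any
      (fun x =>
        pvIsValidSeq (PySem.List.slice cs (some (index : Int)) (some ((index : Int) + (x.1 : Int)))) &&
        pvCanDivideA cs (index + x.1))
termination_by cs.length - index
decreasing_by
  have h := List.mem_range'_1.mp x.2
  omega

def can_divide_subsequences (s : String) : Bool :=
  if s.toList.length < 2 then false else pvCanDivideA s.toList 0

-- ===== PORT B =====
def pvIsVowel (c : Char) : Bool :=
  c == 'a' || c == 'e' || c == 'i' || c == 'o' || c == 'u'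

-- the scanning loop: v = class of the current run, run = its length so far
def pvRunsOk (v : Bool) (run : Nat) : List Char → Bool
  | [] => decide (2 ≤ run)
  | c :: t =>
    if pvIsVowel c == v then pvRunsOk v (run + 1) t
    else if run < 2 then false
    else pvRunsOk (pvIsVowel c) 1 t

def can_divide_subsequences_alt (s : String) : Bool :=
  match s.toList with
  | [] => false
  | [_] => false
  | c :: t => pvRunsOk (pvIsVowel c) 1 t

-- ===== PRECONDITION & SPEC =====
def Spec_can_divide_subsequences (s : String) (out : Bool) : Prop := out = can_divide_subsequences_alt s
instance (s : String) (out : Bool) : Decidable (Spec_can_divide_subsequences s out) := by unfold Spec_can_divide_subsequences; infer_instance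

-- ===== CLAIM (what is proved, stated in full; the proofs are below) =====
def Claim_equal_can_divide_subsequences : Prop := ∀ (s : String), Dom_can_divide_subsequences s → Spec_can_divide_subsequences s (can_divide_subsequences s)

-- ===== LEMMAS AND PROOFS =====

-- B's verdict on a (suffix) list: true iff empty or every maximal run has length ≥ 2
def pvGood : List Char → Bool
  | [] => true
  | c :: t => pvRunsOk (pvIsVowel c) 1 t

lemma pvVowelsA_eq : pvVowelsA = ['a', 'e', 'i', 'o', 'u'] := by decide

lemma pv_mem (c : Char) : pvVowelsA.contains c = pvIsVowel c := by
  rw [pvVowelsA_eq]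
  simp only [PySem.Set.contains, List.contains_cons, List.contains_nil, Bool.or_false,
    pvIsVowel, Bool.or_assoc]

-- A's validity test in terms of B's vowel predicate
lemma pv_valid_eq (seg : List Char) :
    pvIsValidSeq seg =
      (decide (2 ≤ seg.length) &&
        (seg.all pvIsVowel || seg.all (fun c => !pvIsVowel c))) := by
  simp only [pvIsValidSeq, pv_mem]

-- monotonicity of the scanner in the accumulated run length
lemma pvRunsOk_mono : ∀ (l : List Char) (v : Bool) (r r' : Nat),
    r ≤ r' → pvRunsOk v r l = true → pvRunsOk v r' l = true := by
  intro l
  induction l with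
  | nil =>
    intro v r r' h hr
    simp only [pvRunsOk, decide_eq_true_eq] at hr ⊢
    omega
  | cons c t ih =>
    intro v r r' h hr
    simp only [pvRunsOk] at hr ⊢
    by_cases hc : (pvIsVowel c == v) = true
    · rw [if_pos hc] at hr ⊢
      exact ih v (r + 1) (r' + 1) (by omega) hr
    · rw [if_neg hc] at hr ⊢
      by_cases h2 : r < 2
      · rw [if_pos h2] at hr; exact absurd hr (by simp)
      · rw [if_neg h2] at hr
        rw [if_neg (by omega)]
        exact hr

-- a good suffix stays good behind a run already ≥ 2 long
lemma pvRunsOk_of_good : ∀ (l : List Char) (v : Bool) (r : Nat),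
    2 ≤ r → pvGood l = true → pvRunsOk v r l = true := by
  intro l v r h2 hg
  cases l with
  | nil => simp only [pvRunsOk, decide_eq_true_eq]; omega
  | cons c t =>
    simp only [pvGood] at hg
    simp only [pvRunsOk]
    by_cases hc : (pvIsVowel c == v) = true
    · rw [if_pos hc]
      have hce : pvIsVowel c = v := eq_of_beq hc
      exact pvRunsOk_mono t v 1 (r + 1) (by omega) (hce ▸ hg)
    · rw [if_neg hc, if_neg (by omega)]
      exact hg

-- consuming a uniform prefix only grows the run counter
lemma pvRunsOk_consume : ∀ (k : Nat) (l : List Char) (v : Bool) (r : Nat),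
    k ≤ l.length → (∀ x ∈ l.take k, pvIsVowel x = v) →
    pvRunsOk v r l = pvRunsOk v (r + k) (l.drop k) := by
  intro k
  induction k with
  | zero => intro l v r _ _; simp
  | succ k ih =>
    intro l v r hlen huni
    cases l with
    | nil => simp at hlen
    | cons c t =>
      have hc : pvIsVowel c = v := huni c (by simp)
      simp only [pvRunsOk, List.drop_succ_cons]
      rw [if_pos (by simp [hc])]
      have hrec := ih t v (r + 1) (by simpa using hlen) (by
        intro x hx
        exact huni x (by rw [List.take_succ_cons]; exact List.mem_cons_of_mem _ hx))
      rw [hrec]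
      congr 1
      omega

-- length of the leading run of class v
def pvRunLen (v : Bool) : List Char → Nat
  | [] => 0
  | c :: t => if pvIsVowel c = v then pvRunLen v t + 1 else 0

lemma pvRunLen_le (v : Bool) : ∀ (l : List Char), pvRunLen v l ≤ l.length := by
  intro l
  induction l with
  | nil => simp [pvRunLen]
  | cons c t ih =>
    simp only [pvRunLen, List.length_cons]
    split
    · omega
    · omega

lemma pvRunLen_uniform (v : Bool) : ∀ (l : List Char), ∀ x ∈ l.take (pvRunLen v l), pvIsVowel x = v := by
  intro l
  induction l with
  | nil => intro x hx; simp [pvRunLen] at hx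
  | cons c t ih =>
    intro x hx
    simp only [pvRunLen] at hx
    by_cases h : pvIsVowel c = v
    · rw [if_pos h, List.take_succ_cons] at hx
      rcases List.mem_cons.mp hx with h1 | h2
      · rw [h1]; exact h
      · exact ih x h2
    · rw [if_neg h] at hx; simp at hx

-- a successful scan yields a first run of total length ≥ 2 and a good remainder
lemma pvRunsOk_extract : ∀ (l : List Char) (v : Bool) (r : Nat),
    pvRunsOk v r l = true →
    2 ≤ r + pvRunLen v l ∧ pvGood (l.drop (pvRunLen v l)) = true := by
  intro l
  induction l with
  | nil =>
    intro v r hr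
    simp only [pvRunsOk, decide_eq_true_eq] at hr
    refine ⟨by simp [pvRunLen]; omega, by simp [pvRunLen, pvGood]⟩
  | cons c t ih =>
    intro v r hr
    simp only [pvRunsOk] at hr
    simp only [pvRunLen]
    by_cases hc : (pvIsVowel c == v) = true
    · have hce : pvIsVowel c = v := eq_of_beq hc
      rw [if_pos hc] at hr
      obtain ⟨h1, h2⟩ := ih v (r + 1) hr
      rw [if_pos hce]
      exact ⟨by omega, by simpa [List.drop_succ_cons] using h2⟩
    · have hce : ¬ pvIsVowel c = v := by simpa using hc
      rw [if_neg hc] at hr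
      rw [if_neg hce]
      by_cases h2 : r < 2
      · rw [if_pos h2] at hr; exact absurd hr (by simp)
      · rw [if_neg h2] at hr
        refine ⟨by omega, ?_⟩
        simp only [List.drop_zero, pvGood]
        exact hr

-- the crux: one level of A's split search equals B's run check on a nonempty list
lemma pv_crux (c : Char) (rest : List Char) :
    ((List.range' 2 ((c :: rest).length - 1)).any
      (fun k => pvIsValidSeq ((c :: rest).take k) && pvGood ((c :: rest).drop k)))
    = pvGood (c :: rest) := by
  have mp : ((List.range' 2 ((c :: rest).length - 1)).any
      (fun k => pvIsValidSeq ((c :: rest).take k) && pvGood ((c :: rest).drop k))) = true →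
      pvGood (c :: rest) = true := by
    intro hL
    rw [List.any_eq_true] at hL
    obtain ⟨k, hkmem, hk⟩ := hL
    obtain ⟨hk2, hklt⟩ := List.mem_range'_1.mp hkmem
    have hkle : k ≤ rest.length + 1 := by
      simp only [List.length_cons] at hklt; omega
    rw [Bool.and_eq_true] at hk
    obtain ⟨hvalid, hgood⟩ := hk
    rw [pv_valid_eq, Bool.and_eq_true] at hvalid
    obtain ⟨-, hor⟩ := hvalid
    have hex : ∃ w, ∀ x ∈ (c :: rest).take k, pvIsVowel x = w := by
      rcases Bool.or_eq_true_iff.mp hor with h | h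
      · exact ⟨true, by simpa [List.all_eq_true] using h⟩
      · refine ⟨false, fun x hx => ?_⟩
        have := (List.all_eq_true.mp h) x hx
        simpa using this
    obtain ⟨w, huni⟩ := hex
    obtain ⟨k', rfl⟩ : ∃ k', k = k' + 1 := ⟨k - 1, by omega⟩
    have hcw : pvIsVowel c = w := huni c (by rw [List.take_succ_cons]; exact List.mem_cons_self ..)
    simp only [pvGood]
    have hrest : ∀ x ∈ rest.take k', pvIsVowel x = pvIsVowel c := by
      intro x hx
      rw [hcw]
      apply huni
      rw [List.take_succ_cons]
      exact List.mem_cons_of_mem _ hx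
    rw [pvRunsOk_consume k' rest (pvIsVowel c) 1 (by omega) hrest]
    have hdrop : rest.drop k' = (c :: rest).drop (k' + 1) := by simp [List.drop_succ_cons]
    rw [hdrop]
    exact pvRunsOk_of_good _ _ _ (by omega) hgood
  have mpr : pvGood (c :: rest) = true →
      ((List.range' 2 ((c :: rest).length - 1)).any
        (fun k => pvIsValidSeq ((c :: rest).take k) && pvGood ((c :: rest).drop k))) = true := by
    intro hg
    simp only [pvGood] at hg
    obtain ⟨h1, h2⟩ := pvRunsOk_extract rest (pvIsVowel c) 1 hg
    have hjle : pvRunLen (pvIsVowel c) rest ≤ rest.length := pvRunLen_le _ _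
    rw [List.any_eq_true]
    refine ⟨pvRunLen (pvIsVowel c) rest + 1, ?_, ?_⟩
    · rw [List.mem_range'_1]
      simp only [List.length_cons]
      omega
    · rw [Bool.and_eq_true]
      have huni : ∀ x ∈ (c :: rest).take (pvRunLen (pvIsVowel c) rest + 1), pvIsVowel x = pvIsVowel c := by
        intro x hx
        rw [List.take_succ_cons] at hx
        rcases List.mem_cons.mp hx with h | h
        · rw [h]
        · exact pvRunLen_uniform (pvIsVowel c) rest x h
      constructor
      · rw [pv_valid_eq, Bool.and_eq_true]
        constructor
        · simp only [List.take_succ_cons, List.length_cons, List.length_take, decide_eq_true_eq]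
          omega
        · rw [Bool.or_eq_true_iff]
          by_cases hv : pvIsVowel c = true
          · left
            rw [List.all_eq_true]
            intro x hx
            rw [huni x hx, hv]
          · right
            rw [List.all_eq_true]
            intro x hx
            have hf : pvIsVowel c = false := by simpa using hv
            rw [huni x hx, hf]
            rfl
      · have hdr : (c :: rest).drop (pvRunLen (pvIsVowel c) rest + 1)
            = rest.drop (pvRunLen (pvIsVowel c) rest) := by simp [List.drop_succ_cons]
        rw [hdr]
        exact h2
  by_cases hgd : pvGood (c :: rest) = true
  · rw [hgd]; exact mpr hgd
  · have hgf : pvGood (c :: rest) = false := by simpa using hgd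
    rw [hgf]
    cases hB : ((List.range' 2 ((c :: rest).length - 1)).any
      (fun k => pvIsValidSeq ((c :: rest).take k) && pvGood ((c :: rest).drop k))) with
    | false => rfl
    | true => exact absurd (mp hB) hgd

lemma pv_any_attach (l : List Nat) (g : Nat → Bool) :
    l.attach.any (fun x => g x.1) = l.any g := by
  rw [show (fun x : {x // x ∈ l} => g x.1) = g ∘ Subtype.val from rfl, ← List.any_map,
    List.attach_map_subtype_val]

lemma pv_any_congr (l : List Nat) (f g : Nat → Bool) (h : ∀ x ∈ l, f x = g x) :
    l.any f = l.any g := by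
  induction l with
  | nil => rfl
  | cons x t ih =>
    simp only [List.any_cons, h x (by simp), ih (fun y hy => h y (by simp [hy]))]

-- main invariant: A's recursion computes B's run check on the suffix
lemma pv_main : ∀ (m : Nat) (cs : List Char) (i : Nat),
    i ≤ cs.length → cs.length - i ≤ m → pvCanDivideA cs i = pvGood (cs.drop i) := by
  intro m
  induction m with
  | zero =>
    intro cs i h1 h2
    have he : i = cs.length := by omega
    rw [pvCanDivideA, if_pos he, he, List.drop_length]
    rfl
  | succ m ih =>
    intro cs i h1 h2
    by_cases he : i = cs.length
    · rw [pvCanDivideA, if_pos he, he, List.drop_length]; rfl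
    · have hi : i < cs.length := lt_of_le_of_ne h1 he
      rw [pvCanDivideA, if_neg he]
      refine (pv_any_attach (List.range' 2 (cs.length - i - 1))
        (fun k => pvIsValidSeq (PySem.List.slice cs (some (i : Int)) (some ((i : Int) + (k : Int)))) &&
          pvCanDivideA cs (i + k))).trans ?_
      have h1' : (List.range' 2 (cs.length - i - 1)).any
          (fun k => pvIsValidSeq (PySem.List.slice cs (some (i : Int)) (some ((i : Int) + (k : Int)))) &&
            pvCanDivideA cs (i + k))
          = (List.range' 2 (cs.length - i - 1)).any
          (fun k => pvIsValidSeq ((cs.drop i).take k) && pvGood ((cs.drop i).drop k)) := by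
        apply pv_any_congr
        intro k hk
        obtain ⟨hk2, hklt⟩ := List.mem_range'_1.mp hk
        rw [PySem.List.slice_natCast_add]
        rw [ih cs (i + k) (by omega) (by omega)]
        rw [show cs.drop (i + k) = (cs.drop i).drop k from by rw [List.drop_drop, Nat.add_comm]]
      rw [h1']
      obtain ⟨c, rest, hd⟩ : ∃ c rest, cs.drop i = c :: rest := by
        cases hcd : cs.drop i with
        | nil =>
          exfalso
          have hl : (cs.drop i).length = cs.length - i := List.length_drop ..
          rw [hcd] at hl
          simp at hl
          omega
        | cons c rest => exact ⟨c, rest, rfl⟩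
      rw [hd]
      have hlen : cs.length - i - 1 = (c :: rest).length - 1 := by
        have h3 : (cs.drop i).length = cs.length - i := List.length_drop ..
        rw [hd] at h3
        simp only [List.length_cons] at h3 ⊢
        omega
      rw [hlen]
      exact pv_crux c rest

-- ===== VERDICT (by name: the statement is the Claim_ definition above) =====
theorem can_divide_subsequences_spec : Claim_equal_can_divide_subsequences := by
  intro s _
  show can_divide_subsequences s = can_divide_subsequences_alt s
  unfold can_divide_subsequences can_divide_subsequences_alt
  cases h : s.toList with
  | nil => simp
  | cons c t =>
    cases t with
    | nil => simp
    | cons c2 t2 =>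
      rw [if_neg (by simp)]
      rw [pv_main (c :: c2 :: t2).length (c :: c2 :: t2) 0 (by omega) (by omega)]
      simp [pvGood]
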